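-- pv_equiv track=rewrite | github.com/mxu007/daily_coding_problem_practice | DCP_5_2.py | cut_wall_3
-- ===== SOURCE A (Python) =====
-- from collections import defaultdict
--
-- def cut_wall_3(lst):
--     cuts = defaultdict(int)
--     for height in range(0,len(lst)):
--         cum = 0
--         for brick in lst[height][:-1]:
--             cum += brick
--             cuts[cum] +=1
--     return len(lst) - max(cuts.values())
-- ===== SOURCE B (Python) =====
-- def cut_wall_3(lst):
--     # Sort the flat list of interior cumulative edge positions, then a single
--     # grouping scan over the sorted list finds the longest run of equal
--     # positions (= the most frequent cut position); no dictionary is used.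
--     edges = []
--     for row in lst:
--         c = 0
--         for b in row[:-1]:
--             c += b
--             edges.append(c)
--     edges.sort()
--     runs = []
--     n = len(edges)
--     i = 0
--     while i < n:
--         j = i
--         while j < n and edges[j] == edges[i]:
--             j += 1
--         runs.append(j - i)
--         i = j
--     return len(lst) - max(runs)
-- ===== Notes on version B (the rewrite author's own statement) =====
-- stated objective: alternative
-- what changed: B replaces A's defaultdict counting by sort-then-scan: it sorts the flat list of cumulative interior edge positions and finds the longest run of equal consecutive values in one grouping pass, with no dictionary at all.
import Mathlib
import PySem

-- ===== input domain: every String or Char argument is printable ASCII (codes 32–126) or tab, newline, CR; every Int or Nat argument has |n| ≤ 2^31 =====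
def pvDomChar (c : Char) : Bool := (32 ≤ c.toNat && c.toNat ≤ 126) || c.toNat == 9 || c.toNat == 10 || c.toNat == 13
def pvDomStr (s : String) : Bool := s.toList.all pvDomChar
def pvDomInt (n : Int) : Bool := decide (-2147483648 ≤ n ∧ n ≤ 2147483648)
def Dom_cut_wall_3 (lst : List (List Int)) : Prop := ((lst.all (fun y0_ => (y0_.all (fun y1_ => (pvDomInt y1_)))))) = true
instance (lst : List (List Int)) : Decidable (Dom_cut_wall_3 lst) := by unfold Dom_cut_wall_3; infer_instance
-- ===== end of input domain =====

-- B sorts the flat list of cumulative interior edge positions and finds the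
-- longest run of equal consecutive values by a grouping scan (no dictionary);
-- alternative algorithm, not claimed faster.


-- ===== PORT A =====
def cut_wall_3 (lst : List (List Int)) : Int :=
  let cuts : PySem.Dict Int Int :=
    (PySem.List.pyRange 0 (PySem.List.len lst) 1).foldl
      (fun d height =>
        ((PySem.List.slice (PySem.List.pyGetD lst height []) none (some (-1))).foldl
          (fun (p : PySem.Dict Int Int × Int) brick =>
            (p.1.modify (p.2 + brick) 0 (· + 1), p.2 + brick))
          (d, 0)).1)
      PySem.Dict.empty
  PySem.List.len lst - (PySem.List.max? cuts.values (fun v => v)).getD 0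

-- ===== PORT B =====
-- the inner while loop: j advances while edges[j] == edges[i] (takeWhile);
-- the outer while loop restarts at i = j (dropWhile); runs collects j - i.
def groupRuns : List Int → List Int
  | [] => []
  | x :: xs =>
      ((1 : Int) + (xs.takeWhile (fun y => y == x)).length)
        :: groupRuns (xs.dropWhile (fun y => y == x))
  termination_by l => l.length
  decreasing_by
    simpa using Nat.lt_succ_of_le (List.length_dropWhile_le _ _)

def cut_wall_3_alt (lst : List (List Int)) : Int :=
  let edges : List Int :=
    lst.foldl
      (fun acc row =>
        ((PySem.List.slice row none (some (-1))).foldl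
          (fun (p : List Int × Int) b => (p.1 ++ [p.2 + b], p.2 + b))
          (acc, 0)).1)
      []
  let sortedEdges := PySem.List.sorted edges (fun x => x) false
  PySem.List.len lst -
    (PySem.List.max? (groupRuns sortedEdges) (fun v => v)).getD 0

-- ===== PRECONDITION & SPEC =====
-- Pre_ excludes only the inputs with no interior brick edges (every row has
-- fewer than two bricks), on which both Pythons raise ValueError (max of empty).
def Pre_cut_wall_3 (lst : List (List Int)) : Prop :=
  (lst.any (fun row => decide (2 ≤ row.length))) = true
instance (lst : List (List Int)) : Decidable (Pre_cut_wall_3 lst) := by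
  unfold Pre_cut_wall_3; infer_instance
def pvWitness_cut_wall_3 : List (List Int) := [[1, 2], [3]]
def Spec_cut_wall_3 (lst : List (List Int)) (out : Int) : Prop := out = cut_wall_3_alt lst
instance (lst : List (List Int)) (out : Int) : Decidable (Spec_cut_wall_3 lst out) := by unfold Spec_cut_wall_3; infer_instance

-- ===== CLAIM (what is proved, stated in full; the proofs are below) =====
def Claim_equal_cut_wall_3 : Prop := ∀ (lst : List (List Int)), Dom_cut_wall_3 lst → Pre_cut_wall_3 lst → Spec_cut_wall_3 lst (cut_wall_3 lst)

-- ===== LEMMAS AND PROOFS =====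

-- partial sums: pref c [b1, b2, …] = [c+b1, c+b1+b2, …]
def pref (c : Int) : List Int → List Int
  | [] => []
  | b :: bs => (c + b) :: pref (c + b) bs

-- all interior cumulative edge positions, flattened
def edgesOf (lst : List (List Int)) : List Int :=
  lst.flatMap (fun row => pref 0 row.dropLast)

theorem innerA (bs : List Int) (d : PySem.Dict Int Int) (c : Int) :
    bs.foldl (fun (p : PySem.Dict Int Int × Int) b => (p.1.modify (p.2 + b) 0 (· + 1), p.2 + b)) (d, c)
      = ((pref c bs).foldl (fun d x => d.modify x 0 (· + 1)) d, c + bs.sum) := by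
  induction bs generalizing d c with
  | nil => simp [pref]
  | cons b bs ih => simp [pref, List.foldl_cons, ih]; ring

theorem innerB (bs : List Int) (acc : List Int) (c : Int) :
    bs.foldl (fun (p : List Int × Int) b => (p.1 ++ [p.2 + b], p.2 + b)) (acc, c)
      = (acc ++ pref c bs, c + bs.sum) := by
  induction bs generalizing acc c with
  | nil => simp [pref]
  | cons b bs ih => simp [pref, List.foldl_cons, ih]; ring

theorem outerA (lst : List (List Int)) (d : PySem.Dict Int Int) :
    lst.foldl
      (fun d row =>
        ((row.dropLast.foldl
          (fun (p : PySem.Dict Int Int × Int) brick =>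
            (p.1.modify (p.2 + brick) 0 (· + 1), p.2 + brick))
          (d, 0)).1))
      d
      = (edgesOf lst).foldl (fun d x => d.modify x 0 (· + 1)) d := by
  induction lst generalizing d with
  | nil => simp [edgesOf]
  | cons row rest ih =>
      simp only [edgesOf, List.flatMap_cons, List.foldl_cons, List.foldl_append] at *
      rw [innerA, ih]

theorem outerB (lst : List (List Int)) (acc : List Int) :
    lst.foldl
      (fun acc row =>
        ((row.dropLast.foldl
          (fun (p : List Int × Int) b => (p.1 ++ [p.2 + b], p.2 + b))
          (acc, 0)).1))
      acc
      = acc ++ edgesOf lst := by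
  induction lst generalizing acc with
  | nil => simp [edgesOf]
  | cons row rest ih =>
      simp only [edgesOf, List.flatMap_cons, List.foldl_cons] at *
      rw [innerB, ih, List.append_assoc]

-- two Int lists with the same members have the same maximum (as an Option)
theorem max?_congr_mem (l1 l2 : List Int) (h : ∀ x, x ∈ l1 ↔ x ∈ l2) :
    PySem.List.max? l1 (fun v => v) = PySem.List.max? l2 (fun v => v) := by
  cases h1 : PySem.List.max? l1 (fun v => v) with
  | none =>
      cases h2 : PySem.List.max? l2 (fun v => v) with
      | none => rfl
      | some m =>
          have hm := PySem.List.max?_mem h2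
          have : l1 = [] := (PySem.List.max?_eq_none_iff _ _).mp h1
          exact absurd ((h m).mpr hm) (by simp [this])
  | some m1 =>
      cases h2 : PySem.List.max? l2 (fun v => v) with
      | none =>
          have hm := PySem.List.max?_mem h1
          have : l2 = [] := (PySem.List.max?_eq_none_iff _ _).mp h2
          exact absurd ((h m1).mp hm) (by simp [this])
      | some m2 =>
          have hm1 : m1 ∈ l2 := (h m1).mp (PySem.List.max?_mem h1)
          have hm2 : m2 ∈ l1 := (h m2).mpr (PySem.List.max?_mem h2)
          have le1 : m1 ≤ m2 := PySem.List.max?_isMax h2 m1 hm1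
          have le2 : m2 ≤ m1 := PySem.List.max?_isMax h1 m2 hm2
          exact congrArg some (le_antisymm le1 le2)

theorem values_counter_eq (xs : List Int) :
    (PySem.Dict.counter xs).values
      = (PySem.Set.ofList xs).map (fun k => (List.count k xs : Int)) := by
  rw [PySem.Dict.values_eq_map_keys _ (PySem.Dict.nodup_keys_counter xs) 0,
      PySem.Dict.keys_counter]
  exact List.map_congr_left (fun k _ => by
    simp [PySem.Dict.getD_counter])

-- for a sorted list, the run lengths are exactly the multiplicities of its elements
theorem mem_groupRuns (l : List Int) (h : l.Pairwise (· ≤ ·)) (m : Int) :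
    m ∈ groupRuns l ↔ ∃ x ∈ l, m = (List.count x l : Int) := by
  induction l using groupRuns.induct with
  | case1 => simp [groupRuns]
  | case2 x xs ih =>
      have hxs : xs.Pairwise (· ≤ ·) := h.tail
      have hxle : ∀ y ∈ xs, x ≤ y := fun y hy => List.rel_of_pairwise_cons h hy
      set t := xs.takeWhile (fun y => y == x) with ht
      set r := xs.dropWhile (fun y => y == x) with hr
      have hsplit : t ++ r = xs := List.takeWhile_append_dropWhile
      have htmem : ∀ y ∈ t, y = x := by
        intro y hy
        have := List.mem_takeWhile_imp hy
        simpa using this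
      have hrsorted : r.Pairwise (· ≤ ·) := hxs.sublist (List.dropWhile_sublist _)
      have hrne : ∀ y ∈ r, y ≠ x := by
        cases hrc : r with
        | nil => simp
        | cons z r' =>
            intro y hy
            have hz : ¬ ((fun y => y == x) z = true) := by
              have := List.head?_dropWhile_not (fun y => y == x) xs
              rw [← hr, hrc] at this; simpa using this
            have hzx : z ≠ x := by simpa using hz
            have hzmem : z ∈ xs := by
              rw [← hsplit, hrc]; simp
            have hxz : x ≤ z := hxle z hzmem
            have hxz' : x < z := lt_of_le_of_ne hxz (Ne.symm hzx)
            rcases List.mem_cons.mp hy with hy | hy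
            · omega
            · have hzy : z ≤ y := by
                rw [hrc] at hrsorted
                exact List.rel_of_pairwise_cons hrsorted hy
              omega
      have hcount_t : List.count x t = t.length :=
        List.count_eq_length.mpr (fun y hy => (htmem y hy).symm)
      have hcount_r : List.count x r = 0 :=
        List.count_eq_zero.mpr (fun hx => hrne x hx rfl)
      have hcount_x : List.count x (x :: xs) = 1 + t.length := by
        rw [← hsplit, List.count_cons_self, List.count_append, hcount_t, hcount_r]
        omega
      have hcount_y : ∀ y ∈ r, List.count y (x :: xs) = List.count y r := by
        intro y hy
        have hyx : y ≠ x := hrne y hy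
        have hyt : List.count y t = 0 :=
          List.count_eq_zero.mpr (fun hyt => hyx (htmem y hyt))
        have hxy : ¬ x = y := fun h' => hyx h'.symm
        rw [← hsplit]
        simp [List.count_append, hyt, hxy]
      constructor
      · intro hm
        rw [groupRuns] at hm
        rcases List.mem_cons.mp hm with hm | hm
        · exact ⟨x, List.mem_cons_self, by rw [hcount_x]; push_cast at hm ⊢; omega⟩
        · rcases (ih hrsorted).mp hm with ⟨y, hy, hmy⟩
          refine ⟨y, ?_, ?_⟩
          · exact List.mem_cons_of_mem x (by rw [← hsplit]; exact List.mem_append_right _ hy)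
          · rw [hcount_y y hy]; exact hmy
      · rintro ⟨y, hy, hmy⟩
        rw [groupRuns]
        rcases List.mem_cons.mp hy with rfl | hy
        · exact List.mem_cons.mpr (Or.inl (by rw [hcount_x] at hmy; push_cast at hmy ⊢; omega))
        · rw [← hsplit] at hy
          rcases List.mem_append.mp hy with hy | hy
          · have : y = x := htmem y hy
            subst this
            exact List.mem_cons.mpr (Or.inl (by rw [hcount_x] at hmy; push_cast at hmy ⊢; omega))
          · refine List.mem_cons.mpr (Or.inr ((ih hrsorted).mpr ⟨y, hy, ?_⟩))
            rw [← hcount_y y hy]; exact hmy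

-- ===== VERDICT (by name: the statement is the Claim_ definition above) =====
theorem cut_wall_3_spec : Claim_equal_cut_wall_3 := by
  intro lst _ _
  unfold Spec_cut_wall_3 cut_wall_3 cut_wall_3_alt
  simp only [PySem.List.len]
  rw [PySem.List.foldl_pyRange_zero_pyGetD' lst ([] : List Int)
        (fun d row =>
          ((PySem.List.slice row none (some (-1))).foldl
            (fun (p : PySem.Dict Int Int × Int) brick =>
              (p.1.modify (p.2 + brick) 0 (· + 1), p.2 + brick))
            (d, 0)).1)
        PySem.Dict.empty]
  simp only [PySem.List.slice_to_neg_one]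
  rw [outerA, outerB, List.nil_append, ← PySem.Dict.counter_eq_foldl,
      values_counter_eq]
  congr 1
  set e := edgesOf lst
  set s := PySem.List.sorted e (fun x => x) false with hs
  have hperm : s.Perm e := PySem.List.sorted_perm e (fun x => x) false
  have hsorted : s.Pairwise (· ≤ ·) := by
    have := PySem.List.sorted_pairwise (xs := e) (key := fun x => x)
    simpa [← hs] using this
  refine congrArg (fun o => o.getD 0) (max?_congr_mem _ _ ?_)
  intro m
  rw [mem_groupRuns s hsorted m]
  simp only [List.mem_map, PySem.Set.mem_ofList]
  constructor
  · rintro ⟨y, hy, hmy⟩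
    refine ⟨y, hperm.mem_iff.mpr hy, ?_⟩
    rw [hperm.count_eq y]
    exact hmy.symm
  · rintro ⟨y, hy, hmy⟩
    refine ⟨y, hperm.mem_iff.mp hy, ?_⟩
    rw [← hperm.count_eq y]
    exact hmy.symm
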